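-- pv_equiv track=rewrite | github.com/JunSpring/Programmers_Study | YSY/11_25/코드 처리하기.py | solution
-- ===== SOURCE A (Python) =====
-- def solution(code):
--     answer = ''
--     ret=[]
--     mode=False
--     for idx, letter in enumerate(code):
--         if not mode:
--             if (letter!="1") and (idx%2==0):
--                 ret.append(letter)
--             elif letter=="1":
--                 mode=True
--         else:
--             if (letter!="1") and (idx%2==1):
--                 ret.append(letter)
--             elif letter=="1":
--                 mode=False
--     answer=''.join(ret)
--
--     if not answer:
--         answer="EMPTY"
--     return answer
-- ===== SOURCE B (Python) =====
-- def solution(code):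
--     pieces = []
--     offset = 0
--     for k, part in enumerate(code.split("1")):
--         pieces.append(part[(k - offset) % 2 :: 2])
--         offset += len(part) + 1
--     return ''.join(pieces) or "EMPTY"
-- ===== Notes on version B (the rewrite author's own statement) =====
-- stated objective: faster
-- what changed: Replaces A's single stateful per-character pass (a mode flag toggled by '1's with a per-character branch) by a staged computation: split the string on '1' into chunks, then take a stride-2 slice of each chunk whose start is derived from the chunk number and running offset parity, and join the slices.
import Mathlib
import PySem

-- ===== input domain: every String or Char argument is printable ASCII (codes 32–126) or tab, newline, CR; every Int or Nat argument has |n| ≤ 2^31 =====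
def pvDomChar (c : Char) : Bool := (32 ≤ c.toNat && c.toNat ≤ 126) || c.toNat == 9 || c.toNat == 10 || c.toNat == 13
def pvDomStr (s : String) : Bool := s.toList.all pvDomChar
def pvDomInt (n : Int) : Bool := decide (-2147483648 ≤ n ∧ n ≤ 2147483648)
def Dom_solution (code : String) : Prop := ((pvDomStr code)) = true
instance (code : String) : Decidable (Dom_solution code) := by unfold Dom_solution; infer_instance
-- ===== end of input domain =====

-- B replaces A's single stateful pass by a staged computation: split the string on '1',
-- then take a stride-2 slice of each chunk (start chosen from chunk number and offset parity); same O(n), measured faster by a constant factor (bulk split/slice vs a per-character loop).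

-- ===== PORT A =====
-- loop body of A: state (ret, mode), one enumerate item (idx, letter)
def solStepA (st : List Char × Bool) (p : Int × Char) : List Char × Bool :=
  if st.2 = false then
    if p.2 ≠ '1' ∧ PySem.Int.mod p.1 2 = 0 then (st.1 ++ [p.2], st.2)
    else if p.2 = '1' then (st.1, true)
    else st
  else
    if p.2 ≠ '1' ∧ PySem.Int.mod p.1 2 = 1 then (st.1 ++ [p.2], st.2)
    else if p.2 = '1' then (st.1, false)
    else st

def solution (code : String) : String :=
  let ret := ((PySem.List.enumerate code.toList).foldl solStepA ([], false)).1
  let answer := String.ofList ret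
  if answer = "" then "EMPTY" else answer

-- ===== PORT B =====
-- loop body of B: state (pieces, offset), one enumerate item (k, part);
-- part[(k-offset) % 2 :: 2] is slice? with step 2 (a literal ≠ 0, so slice? is always `some`; .getD [] is exact)
def solStepB (st : List (List Char) × Int) (p : Int × List Char) : List (List Char) × Int :=
  (st.1 ++ [(PySem.List.slice? p.2 (some (PySem.Int.mod (p.1 - st.2) 2)) none 2).getD []],
   st.2 + p.2.length + 1)

def solution_alt (code : String) : String :=
  let parts := PySem.Chars.splitOn code.toList ['1']
  let pieces := ((PySem.List.enumerate parts).foldl solStepB ([], 0)).1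
  let answer := String.ofList (PySem.Chars.join [] pieces)
  if answer = "" then "EMPTY" else answer

-- ===== PRECONDITION & SPEC =====
def Spec_solution (code : String) (out : String) : Prop := out = solution_alt code
instance (code : String) (out : String) : Decidable (Spec_solution code out) := by unfold Spec_solution; infer_instance

-- ===== CLAIM (what is proved, stated in full; the proofs are below) =====
def Claim_equal_solution : Prop := ∀ (code : String), Dom_solution code → Spec_solution code (solution code)

-- ===== LEMMAS AND PROOFS =====

-- enumerate equations
theorem enum_nil {α : Type} (n : Int) : PySem.List.enumerate ([] : List α) n = [] := by
  simp [PySem.List.enumerate]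
theorem enum_cons {α : Type} (c : α) (l : List α) (n : Int) :
    PySem.List.enumerate (c :: l) n = (n, c) :: PySem.List.enumerate l (n + 1) := by
  simp [PySem.List.enumerate]

-- every-other-element helpers
def evens {α : Type} : List α → List α
  | [] => []
  | [c] => [c]
  | c :: _ :: t => c :: evens t

def odds {α : Type} : List α → List α
  | [] => []
  | _ :: t => evens t

theorem evens_cons {α : Type} (c : α) (l : List α) : evens (c :: l) = c :: odds l := by
  cases l <;> rfl

theorem length_evens {α : Type} : ∀ (l : List α), (evens l).length = (l.length + 1) / 2
  | [] => by simp [evens]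
  | [_] => by simp [evens]
  | _ :: _ :: t => by
      simp [evens, length_evens t]; omega

theorem length_odds {α : Type} (l : List α) : (odds l).length = l.length / 2 := by
  cases l with
  | nil => simp [odds]
  | cons c t => simp [odds, length_evens t]

theorem evens_getElem? {α : Type} : ∀ (l : List α) (k : Nat), (evens l)[k]? = l[2 * k]?
  | [], k => by simp [evens]
  | [c], k => by cases k <;> simp [evens, Nat.mul_succ]
  | c :: d :: t, k => by
      cases k with
      | zero => simp [evens]
      | succ k =>
          have := evens_getElem? t k
          simp [evens, Nat.mul_succ, this]

theorem odds_getElem? {α : Type} (l : List α) (k : Nat) : (odds l)[k]? = l[2 * k + 1]? := by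
  cases l with
  | nil => simp [odds]
  | cons c t => simp [odds, evens_getElem? t k]

theorem filterMap_range_take {α : Type} (ys : List α) : ∀ (n : Nat),
    List.filterMap (fun k => ys[k]?) (List.range n) = ys.take n
  | 0 => by simp
  | n + 1 => by
      rw [List.range_succ, List.filterMap_append, filterMap_range_take ys n, List.take_add_one]
      cases h : ys[n]? <;> simp [List.filterMap, h]

-- xs[0::2] and xs[1::2]
theorem slice?_two_zero (xs : List Char) :
    PySem.List.slice? xs (some 0) none 2 = some (evens xs) := by
  cases xs with
  | nil => rfl
  | cons a t =>
      simp only [PySem.List.slice?, PySem.List.sliceIndices]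
      norm_num
      have hmin : min (0 : Int) ((t.length : Int) + 1) = 0 := by omega
      rw [hmin]
      have hc : (((t.length : Int) + 1 - 0 + 2 - 1) / 2).toNat = (evens (a :: t)).length := by
        rw [length_evens]
        simp only [List.length_cons]
        omega
      rw [hc]
      have hf : ∀ k ∈ List.range (evens (a :: t)).length,
          (a :: t)[(0 + 2 * (k : Int)).toNat]? = (evens (a :: t))[k]? := by
        intro k _
        have : (0 + 2 * (k : Int)).toNat = 2 * k := by omega
        rw [this, evens_getElem?]
      rw [List.filterMap_congr hf, filterMap_range_take, List.take_length]

theorem slice?_two_one (xs : List Char) :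
    PySem.List.slice? xs (some 1) none 2 = some (odds xs) := by
  cases xs with
  | nil => rfl
  | cons a t =>
      simp only [PySem.List.slice?, PySem.List.sliceIndices]
      norm_num
      have hc : (if 0 < t.length then (((t.length : Int) + 2 - 1) / 2).toNat else 0)
          = (odds (a :: t)).length := by
        rw [length_odds]
        by_cases h : 0 < t.length <;> simp [h] <;> omega
      rw [hc]
      have hf : ∀ k ∈ List.range (odds (a :: t)).length,
          (a :: t)[(1 + 2 * (k : Int)).toNat]? = (odds (a :: t))[k]? := by
        intro k _
        have : (1 + 2 * (k : Int)).toNat = 2 * k + 1 := by omega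
        rw [this, odds_getElem?]
      rw [List.filterMap_congr hf, filterMap_range_take, List.take_length]

-- PySem mod by 2 is emod
theorem pymod_two (a : Int) : PySem.Int.mod a 2 = a % 2 :=
  PySem.Int.mod_eq_emod_of_pos (by norm_num)

theorem parity_flip (n : Int) : decide ((n + 1) % 2 = 1) = !decide (n % 2 = 1) := by
  by_cases h : n % 2 = 1
  · simp [h]; omega
  · simp [h]; omega

-- the common reference function: keep c at index n iff c ≠ '1' and parity of n matches mode m
def ref : List Char → Int → Bool → List Char
  | [], _, _ => []
  | c :: cs, n, m =>
      if c = '1' then ref cs (n + 1) (!m)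
      else if decide (n % 2 = 1) = m then c :: ref cs (n + 1) m
      else ref cs (n + 1) m

-- A's fold is ref
theorem foldA_ref : ∀ (cs : List Char) (n : Int) (ret : List Char) (m : Bool),
    ((PySem.List.enumerate cs n).foldl solStepA (ret, m)).1 = ret ++ ref cs n m
  | [], n, ret, m => by simp [enum_nil, ref]
  | c :: cs, n, ret, m => by
      rw [enum_cons]
      simp only [List.foldl_cons]
      by_cases h1 : c = '1'
      · cases m <;>
          simp [solStepA, ref, h1, foldA_ref cs (n + 1)]
      · by_cases hp : n % 2 = 1
        · cases m <;>
            simp [solStepA, ref, h1, hp, pymod_two, foldA_ref cs (n + 1)] <;> omega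
        · have hp0 : n % 2 = 0 := by omega
          cases m <;>
            simp [solStepA, ref, h1, hp, hp0, pymod_two, foldA_ref cs (n + 1)]

-- ref on a '1'-free chunk is a stride-2 selection
theorem ref_chunk : ∀ (p rest : List Char) (n : Int) (m : Bool), '1' ∉ p →
    ref (p ++ rest) n m
      = (if decide (n % 2 = 1) = m then evens p else odds p) ++ ref rest (n + p.length) m
  | [], rest, n, m, _ => by simp [evens, odds]
  | c :: p, rest, n, m, h => by
      have hc : c ≠ '1' := by intro hc; exact h (hc ▸ List.mem_cons_self)
      have hp : '1' ∉ p := fun hx => h (List.mem_cons_of_mem _ hx)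
      have ih := ref_chunk p rest (n + 1) m hp
      rw [parity_flip] at ih
      have hL : n + (((c :: p).length : Nat) : Int) = n + 1 + (p.length : Int) := by
        push_cast [List.length_cons]; ring
      simp only [List.cons_append, ref, if_neg hc]
      rw [hL]
      by_cases hd : decide (n % 2 = 1) = m
      · rw [if_pos hd, if_pos hd, ih, if_neg (by rw [hd]; cases m <;> simp), evens_cons]
        simp
      · rw [if_neg hd, if_neg hd, ih, if_pos (by cases m <;> cases hx : decide (n % 2 = 1) <;> simp_all)]
        have hodds : odds (c :: p) = evens p := rfl
        rw [hodds]

-- Python's split('1') as a structural recursion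
def mySplit : List Char → List (List Char)
  | [] => [[]]
  | c :: rest => if c = '1' then [] :: mySplit rest else (mySplit rest).modifyHead (c :: ·)

theorem mySplit_ne_nil : ∀ (cs : List Char), mySplit cs ≠ []
  | [] => by simp [mySplit]
  | c :: rest => by
      simp only [mySplit]
      split
      · simp
      · cases hq : mySplit rest with
        | nil => exact absurd hq (mySplit_ne_nil rest)
        | cons q r => simp [hq]

theorem go_spec : ∀ (fuel : Nat) (l cur : List Char) (acc : List (List Char)), l.length ≤ fuel →
    PySem.Chars.splitOn.go ['1'] fuel l cur acc
      = acc.reverse ++ (mySplit l).modifyHead (cur.reverse ++ ·)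
  | 0, l, cur, acc, h => by
      have : l = [] := List.length_eq_zero_iff.1 (Nat.le_zero.1 h)
      subst this
      simp [PySem.Chars.splitOn.go, mySplit]
  | fuel + 1, [], cur, acc, _ => by
      simp [PySem.Chars.splitOn.go, mySplit]
  | fuel + 1, c :: rest, cur, acc, h => by
      rw [PySem.Chars.splitOn.go]
      by_cases hc : c = '1'
      · have hpref : List.isPrefixOf ['1'] (c :: rest) = true := by
          simp [List.isPrefixOf, hc]
        rw [if_pos hpref]
        have ih := go_spec fuel rest [] (cur.reverse :: acc) (by simpa using Nat.le_of_succ_le_succ h)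
        have hdrop : List.drop (['1'] : List Char).length (c :: rest) = rest := by simp
        rw [hdrop, ih]
        simp [mySplit, hc]
        cases mySplit rest <;> simp
      · have hpref : List.isPrefixOf ['1'] (c :: rest) = false := by
          simp [List.isPrefixOf]; exact fun h' => absurd h'.symm hc
        rw [if_neg (by simp [hpref])]
        have ih := go_spec fuel rest (c :: cur) acc (by simpa using Nat.le_of_succ_le_succ h)
        rw [ih]
        simp only [mySplit, if_neg hc, List.modifyHead_modifyHead]
        congr 1
        cases mySplit rest <;> simp

theorem splitOn_eq_mySplit (cs : List Char) : PySem.Chars.splitOn cs ['1'] = mySplit cs := by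
  rw [PySem.Chars.splitOn, go_spec (cs.length + 1) cs [] [] (by omega)]
  rcases hq : mySplit cs with _ | ⟨q, r⟩
  · exact absurd hq (mySplit_ne_nil cs)
  · simp

-- gluing the chunks back with '1' separators
def glue : List (List Char) → List Char
  | [] => []
  | [p] => p
  | p :: q :: r => p ++ '1' :: glue (q :: r)

theorem glue_modifyHead (c : Char) (q : List Char) (r : List (List Char)) :
    glue ((c :: q) :: r) = c :: glue (q :: r) := by
  cases r <;> simp [glue]


theorem glue_mySplit : ∀ (cs : List Char), glue (mySplit cs) = cs
  | [] => rfl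
  | c :: rest => by
      simp only [mySplit]
      by_cases hc : c = '1'
      · rw [if_pos hc]
        rcases hq : mySplit rest with _ | ⟨q, r⟩
        · exact absurd hq (mySplit_ne_nil rest)
        · have := glue_mySplit rest
          rw [hq] at this
          simp [glue, this, hc]
      · rw [if_neg hc]
        rcases hq : mySplit rest with _ | ⟨q, r⟩
        · exact absurd hq (mySplit_ne_nil rest)
        · have := glue_mySplit rest
          rw [hq] at this
          simp only [List.modifyHead, glue_modifyHead, this]

theorem mySplit_no_one : ∀ (cs : List Char) (p : List Char), p ∈ mySplit cs → '1' ∉ p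
  | [], p, hp => by
      simp [mySplit] at hp; simp [hp]
  | c :: rest, p, hp => by
      by_cases hc : c = '1'
      · simp only [mySplit, if_pos hc, List.mem_cons] at hp
        rcases hp with rfl | hp
        · simp
        · exact mySplit_no_one rest p hp
      · simp only [mySplit, if_neg hc] at hp
        rcases hq : mySplit rest with _ | ⟨q, r⟩
        · exact absurd hq (mySplit_ne_nil rest)
        · rw [hq] at hp
          simp only [List.modifyHead, List.mem_cons] at hp
          rcases hp with rfl | hp
          · have hqn : '1' ∉ q := mySplit_no_one rest q (by rw [hq]; exact List.mem_cons_self)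
            intro hmem
            rcases List.mem_cons.mp hmem with h1 | h1
            · exact hc h1.symm
            · exact hqn h1
          · exact mySplit_no_one rest p (by rw [hq]; exact List.mem_cons_of_mem _ hp)

-- join with empty separator is flatten
theorem join_nil_flatten (ps : List (List Char)) : PySem.Chars.join [] ps = ps.flatten := by
  induction ps with
  | nil => rfl
  | cons p r ih =>
      simp [PySem.Chars.join, List.intercalate] at ih ⊢
      cases r <;> simp_all [List.intersperse]

-- B's fold over the chunks equals ref over the glued string
theorem foldB_ref : ∀ (parts : List (List Char)) (k off : Int) (pieces : List (List Char)),
    (∀ p ∈ parts, '1' ∉ p) →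
    (((PySem.List.enumerate parts k).foldl solStepB (pieces, off)).1).flatten
      = pieces.flatten ++ ref (glue parts) off (decide (k % 2 = 1))
  | [], k, off, pieces, _ => by simp [enum_nil, glue, ref]
  | p :: rest, k, off, pieces, h => by
      have hp : '1' ∉ p := h p List.mem_cons_self
      have hrest : ∀ q ∈ rest, '1' ∉ q := fun q hq => h q (List.mem_cons_of_mem _ hq)
      rw [enum_cons]
      simp only [List.foldl_cons, solStepB]
      have hsl : (PySem.List.slice? p (some (PySem.Int.mod (k - off) 2)) none 2).getD []
          = if (k - off) % 2 = 0 then evens p else odds p := by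
        rw [pymod_two]
        by_cases hpar : (k - off) % 2 = 0
        · rw [hpar, slice?_two_zero]; simp
        · have h1 : (k - off) % 2 = 1 := by omega
          rw [h1, slice?_two_one]; simp [hpar]
      have ih := foldB_ref rest (k + 1) (off + p.length + 1) (pieces ++ [(PySem.List.slice? p (some (PySem.Int.mod (k - off) 2)) none 2).getD []]) hrest
      rw [ih, hsl]
      have hsel : (if (k - off) % 2 = 0 then evens p else odds p)
          = (if decide (off % 2 = 1) = decide (k % 2 = 1) then evens p else odds p) := by
        by_cases h0 : (k - off) % 2 = 0
        · rw [if_pos h0, if_pos]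
          by_cases hk : k % 2 = 1 <;> simp [hk] <;> omega
        · rw [if_neg h0, if_neg]
          by_cases hk : k % 2 = 1 <;> simp [hk] <;> omega
      cases rest with
      | nil =>
          simp only [glue, enum_nil, List.foldl_nil, ref]
          have := ref_chunk p [] off (decide (k % 2 = 1)) hp
          simp only [List.append_nil, ref] at this
          rw [this, hsel]
          simp
      | cons q r =>
          have hglue : glue (p :: q :: r) = p ++ '1' :: glue (q :: r) := rfl
          rw [hglue, ref_chunk p ('1' :: glue (q :: r)) off (decide (k % 2 = 1)) hp]
          simp only [ref, if_pos rfl]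
          rw [hsel]
          have hflip : decide ((k + 1) % 2 = 1) = !decide (k % 2 = 1) := parity_flip k
          rw [hflip]
          simp [List.append_assoc]

-- ===== VERDICT (by name: the statement is the Claim_ definition above) =====
theorem solution_spec : Claim_equal_solution := by
  intro code _
  unfold Spec_solution solution solution_alt
  have hA := foldA_ref code.toList 0 [] false
  have hB := foldB_ref (PySem.Chars.splitOn code.toList ['1']) 0 0 []
      (by rw [splitOn_eq_mySplit]; exact mySplit_no_one code.toList)
  rw [splitOn_eq_mySplit, glue_mySplit] at hB
  simp only [hA, List.nil_append, join_nil_flatten]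
  rw [splitOn_eq_mySplit]
  rw [hB]
  norm_num
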